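-- pv_equiv track=rewrite | github.com/alex-schaaf/adventofcode2019 | 06/06.py | get_graph
-- ===== SOURCE A (Python) =====
-- def get_graph(orbit_codes):
--     graph = {}
--     edges = set()
--     nodes = set()
--     for edge in orbit_codes:
--         e1, e2 = edge.split(")")
--         edges.add((e1, e2))
--         nodes.add(e1)
--         nodes.add(e2)
--         if e1 in graph.keys():
--             graph[e1].append(e2)
--         else:
--             graph[e1] = [e2]
--
--     return graph, nodes, edges
-- ===== SOURCE B (Python) =====
-- def get_graph(orbit_codes):
--     pairs = []
--     for code in orbit_codes:
--         a, b = code.split(")")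
--         pairs.append((a, b))
--     edges = set(pairs)
--     nodes = {x for p in pairs for x in p}
--     graph = {a: [b for x, b in pairs if x == a]
--              for a in dict.fromkeys(x for x, _ in pairs)}
--     return graph, nodes, edges
-- ===== Notes on version B (the rewrite author's own statement) =====
-- stated objective: alternative
-- what changed: B replaces A's single interleaved loop with incremental dict appends by: parse into an ordered pair list, derive edges/nodes by comprehensions, and build the adjacency mapping with no incremental updates at all - for each distinct parent (first-occurrence order via dict.fromkeys) an inner filtering scan of the pair list collects its children.
import Mathlib
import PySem

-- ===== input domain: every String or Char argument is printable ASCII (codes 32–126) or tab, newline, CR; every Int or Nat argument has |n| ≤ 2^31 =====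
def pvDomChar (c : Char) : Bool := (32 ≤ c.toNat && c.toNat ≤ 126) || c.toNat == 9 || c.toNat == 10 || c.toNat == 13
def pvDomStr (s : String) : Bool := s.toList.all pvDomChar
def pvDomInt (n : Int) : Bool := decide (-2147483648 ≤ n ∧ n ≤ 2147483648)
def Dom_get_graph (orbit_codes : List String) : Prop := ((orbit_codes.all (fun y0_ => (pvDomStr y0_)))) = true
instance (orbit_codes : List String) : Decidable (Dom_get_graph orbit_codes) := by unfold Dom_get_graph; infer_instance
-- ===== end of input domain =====

-- B builds the adjacency mapping with no incremental dict updates: one filtering scan of the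
-- parsed pair list per distinct parent, keys in first-occurrence order; edges/nodes by
-- comprehensions over the pair list (alternative decomposition, not claimed faster).

-- ===== PORT A =====
def get_graph (orbit_codes : List String) : (List (String × List String)) × List String × (List (String × String)) :=
  let st := orbit_codes.foldl
    (fun (st : PySem.Dict String (List String) × PySem.Set String × PySem.Set (String × String)) edge =>
      match PySem.Str.split? edge ")" with
      | some [e1, e2] =>
        let graph := st.1
        let edges := PySem.Set.add st.2.2 (e1, e2)
        let nodes := PySem.Set.add (PySem.Set.add st.2.1 e1) e2
        let graph :=
          if graph.contains e1 then graph.insert e1 (graph.getD e1 [] ++ [e2])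
          else graph.insert e1 [e2]
        (graph, nodes, edges)
      | _ => st)  -- unreachable under Pre_ (Python raises ValueError here)
    (PySem.Dict.empty, PySem.Set.empty, PySem.Set.empty)
  (st.1.items, st.2.1, st.2.2)

-- ===== PORT B =====
def pvPairs (orbit_codes : List String) : List (String × String) :=
  orbit_codes.foldl
    (fun acc edge =>
      -- a, b = code.split(")") : exactly-two-part unpack (Python raises ValueError otherwise,
      -- excluded by Pre_); split? is never none since the separator ")" is non-empty
      let parts := (PySem.Str.split? edge ")").getD []
      if parts.length = 2 then acc ++ [(parts.getD 0 "", parts.getD 1 "")] else acc)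
    []

def get_graph_alt (orbit_codes : List String) : (List (String × List String)) × List String × (List (String × String)) :=
  let pairs := pvPairs orbit_codes
  let edges : PySem.Set (String × String) := PySem.Set.ofList pairs
  let nodes : PySem.Set String := PySem.Set.ofList (pairs.flatMap (fun p => [p.1, p.2]))
  let graph : PySem.Dict String (List String) :=
    (PySem.List.dedup (pairs.map Prod.fst)).foldl
      (fun g a => g.insert a ((pairs.filter (fun p => p.1 == a)).map Prod.snd))
      PySem.Dict.empty
  (graph.items, nodes, edges)

-- ===== PRECONDITION & SPEC =====
-- Pre_ excludes exactly the inputs where Python A raises ValueError: a code whose split on ")"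
-- does not give exactly two parts (B raises there too).
def Pre_get_graph (orbit_codes : List String) : Prop :=
  ∀ s ∈ orbit_codes, ((PySem.Str.split? s ")").getD []).length = 2
instance (orbit_codes : List String) : Decidable (Pre_get_graph orbit_codes) := by unfold Pre_get_graph; infer_instance
def pvWitness_get_graph : List String := ["COM)B", "B)C", "COM)D"]
def Spec_get_graph (orbit_codes : List String) (out : (List (String × List String)) × List String × (List (String × String))) : Prop := out = get_graph_alt orbit_codes
instance (orbit_codes : List String) (out : (List (String × List String)) × List String × (List (String × String))) : Decidable (Spec_get_graph orbit_codes out) := by unfold Spec_get_graph; infer_instance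

-- ===== CLAIM (what is proved, stated in full; the proofs are below) =====
def Claim_equal_get_graph : Prop := ∀ (orbit_codes : List String), Dom_get_graph orbit_codes → Pre_get_graph orbit_codes → Spec_get_graph orbit_codes (get_graph orbit_codes)

-- ===== LEMMAS AND PROOFS =====

-- A's guarded append-or-create update on the dict is exactly dict.modify.
theorem pv_gstep_eq (g : PySem.Dict String (List String)) (e1 e2 : String) :
    (if g.contains e1 then g.insert e1 (g.getD e1 [] ++ [e2]) else g.insert e1 [e2])
      = g.modify e1 [] (· ++ [e2]) := by
  by_cases h : g.contains e1 = true
  · simp [h, PySem.Dict.modify, PySem.Dict.getD_eq_get?_getD]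
  · have h0 : g.contains e1 = false := by simpa using h
    have h1 : g.getD e1 ([] : List String) = [] := by
      simp [PySem.Dict.getD_of_not_contains, h0]
    simp [h0, h1, PySem.Dict.modify]

theorem pv_pairs_acc (codes : List String) (acc : List (String × String)) :
    codes.foldl
      (fun acc edge =>
        let parts := (PySem.Str.split? edge ")").getD []
        if parts.length = 2 then acc ++ [(parts.getD 0 "", parts.getD 1 "")] else acc) acc
    = acc ++ pvPairs codes := by
  induction codes generalizing acc with
  | nil => simp [pvPairs]
  | cons c t ih =>
    simp only [pvPairs, List.foldl_cons]
    rw [ih, ih]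
    by_cases hc : ((PySem.Str.split? c ")").getD []).length = 2 <;> simp [hc]

-- A's interleaved fold is the product of three independent folds over the pair list.
theorem pv_main (codes : List String)
    (g : PySem.Dict String (List String)) (n : PySem.Set String) (e : PySem.Set (String × String)) :
    codes.foldl
      (fun (st : PySem.Dict String (List String) × PySem.Set String × PySem.Set (String × String)) edge =>
        match PySem.Str.split? edge ")" with
        | some [e1, e2] =>
          let graph := st.1
          let edges := PySem.Set.add st.2.2 (e1, e2)
          let nodes := PySem.Set.add (PySem.Set.add st.2.1 e1) e2
          let graph :=
            if graph.contains e1 then graph.insert e1 (graph.getD e1 [] ++ [e2])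
            else graph.insert e1 [e2]
          (graph, nodes, edges)
        | _ => st) (g, n, e)
    = ((pvPairs codes).foldl (fun g p => g.modify p.1 [] (· ++ [p.2])) g,
       (pvPairs codes).foldl (fun s p => PySem.Set.add (PySem.Set.add s p.1) p.2) n,
       (pvPairs codes).foldl (fun s p => PySem.Set.add s p) e) := by
  induction codes generalizing g n e with
  | nil => simp [pvPairs]
  | cons c t ih =>
    have hp : pvPairs (c :: t) =
        (let parts := (PySem.Str.split? c ")").getD []
         if parts.length = 2 then [(parts.getD 0 "", parts.getD 1 "")] else []) ++ pvPairs t := by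
      simp only [pvPairs, List.foldl_cons]
      rw [pv_pairs_acc]
      by_cases hc : ((PySem.Str.split? c ")").getD []).length = 2 <;> simp [hc, pvPairs]
    rw [hp]
    rcases h : PySem.Str.split? c ")" with _ | ⟨_ | ⟨a, _ | ⟨b, _ | _⟩⟩⟩ <;>
      simp only [h, Option.getD_some, Option.getD_none, List.length_cons, List.length_nil,
        List.getD, List.getElem?_cons_zero, List.getElem?_cons_succ, Option.getD_some,
        List.foldl_cons, List.singleton_append, if_true] <;>
      norm_num <;>
      first
        | exact ih g n e
        | (rw [pv_gstep_eq]; exact ih _ _ _)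

-- Folding the two endpoints of each pair is folding Set.add over the flattened list.
theorem pv_nodes (ps : List (String × String)) (s : PySem.Set String) :
    ps.foldl (fun s p => PySem.Set.add (PySem.Set.add s p.1) p.2) s
      = (ps.flatMap (fun p => [p.1, p.2])).foldl PySem.Set.add s := by
  induction ps generalizing s with
  | nil => simp
  | cons p t ih => simp [ih]

-- A's accumulated dict, as an items list: distinct parents in first-occurrence order, each
-- paired with the filtered children of the whole pair list — exactly B's construction.
theorem pv_graph_items (ps : List (String × String)) :
    (ps.foldl (fun g p => g.modify p.1 [] (· ++ [p.2])) PySem.Dict.empty).items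
      = ((PySem.List.dedup (ps.map Prod.fst)).foldl
          (fun (g : PySem.Dict String (List String)) a =>
            g.insert a ((ps.filter (fun p => p.1 == a)).map Prod.snd))
          PySem.Dict.empty).items := by
  have hnd : (ps.foldl (fun g p => g.modify p.1 [] (· ++ [p.2])) PySem.Dict.empty).keys.Nodup := by
    exact PySem.Dict.nodup_keys_foldl_modify_key ps Prod.fst [] (fun d x => (· ++ [x.2])) _
      (by simp [PySem.Dict.empty])
  have hkeys : (ps.foldl (fun g p => g.modify p.1 [] (· ++ [p.2])) PySem.Dict.empty).keys
      = PySem.List.dedup (ps.map Prod.fst) := by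
    rw [PySem.Dict.keys_foldl_modify_key]
    simp [PySem.Set.update, PySem.Dict.keys_empty, PySem.List.dedup_eq_ofList,
      PySem.Set.ofList_eq_foldl]
  have hA : (ps.foldl (fun g p => g.modify p.1 [] (· ++ [p.2])) PySem.Dict.empty).items
      = (PySem.List.dedup (ps.map Prod.fst)).map
          (fun a => (a, (ps.filter (fun p => p.1 == a)).map Prod.snd)) := by
    rw [PySem.Dict.items_eq_map_keys _ hnd ([] : List String), hkeys]
    apply List.map_congr_left
    intro a _
    rw [PySem.Dict.getD_foldl_modify_append]
    simp [PySem.Dict.getD_empty]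
  have hB : ((PySem.List.dedup (ps.map Prod.fst)).foldl
        (fun (g : PySem.Dict String (List String)) a =>
          g.insert a ((ps.filter (fun p => p.1 == a)).map Prod.snd))
        PySem.Dict.empty).items
      = (PySem.List.dedup (ps.map Prod.fst)).map
          (fun a => (a, (ps.filter (fun p => p.1 == a)).map Prod.snd)) := by
    rw [PySem.Dict.items_foldl_insert_fresh (k := fun a => a)]
    · simp [PySem.Dict.empty]
    · intro a _; simp [PySem.Dict.contains_empty]
    · simpa using PySem.List.nodup_dedup (ps.map Prod.fst)
  rw [hA, hB]

-- ===== VERDICT (by name: the statement is the Claim_ definition above) =====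
theorem get_graph_spec : Claim_equal_get_graph := by
  intro codes _ _
  show _ = _
  unfold get_graph get_graph_alt
  rw [pv_main]
  refine Prod.ext ?_ (Prod.ext ?_ ?_)
  · exact pv_graph_items (pvPairs codes)
  · simpa [PySem.Set.ofList_eq_foldl] using pv_nodes (pvPairs codes) PySem.Set.empty
  · simp [PySem.Set.ofList_eq_foldl]
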